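-- pv_equiv track=rewrite | github.com/gitchang893/ICAIL2026-PoC | poc/shared/eventschange_control/approval_flow.py | _derive_request_status
-- ===== SOURCE A (Python) =====
-- from typing import Any, Dict, List, Optional
--
-- def _derive_request_status(req: Dict[str, Any]) -> str:
--     approvals = req.get("approvals", [])
--     if not approvals:
--         return "submitted"
--
--     decisions = {a["decision"] for a in approvals}
--     if "rejected" in decisions:
--         return "rejected"
--     if all(dec == "approved" for dec in decisions):
--         return "approved"
--     if "deferred" in decisions:
--         return "deferred"
--     return "pending_review"
-- ===== SOURCE B (Python) =====
-- _STATUS_BY_SEVERITY = ("approved", "pending_review", "deferred", "rejected")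
--
-- def _severity(decision):
--     if decision == "rejected":
--         return 3
--     if decision == "deferred":
--         return 2
--     if decision == "approved":
--         return 0
--     return 1
--
-- def _derive_request_status(req):
--     approvals = req.get("approvals", [])
--     if not approvals:
--         return "submitted"
--     worst = max(_severity(a["decision"]) for a in approvals)
--     return _STATUS_BY_SEVERITY[worst]
-- ===== Notes on version B (the rewrite author's own statement) =====
-- stated objective: alternative
-- what changed: Replaces the set-build plus precedence chain of membership/all tests with a max-reduction over a numeric severity lattice (approved=0, unknown=1, deferred=2, rejected=3) followed by a table lookup; the branch chain disappears entirely.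
import Mathlib
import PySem

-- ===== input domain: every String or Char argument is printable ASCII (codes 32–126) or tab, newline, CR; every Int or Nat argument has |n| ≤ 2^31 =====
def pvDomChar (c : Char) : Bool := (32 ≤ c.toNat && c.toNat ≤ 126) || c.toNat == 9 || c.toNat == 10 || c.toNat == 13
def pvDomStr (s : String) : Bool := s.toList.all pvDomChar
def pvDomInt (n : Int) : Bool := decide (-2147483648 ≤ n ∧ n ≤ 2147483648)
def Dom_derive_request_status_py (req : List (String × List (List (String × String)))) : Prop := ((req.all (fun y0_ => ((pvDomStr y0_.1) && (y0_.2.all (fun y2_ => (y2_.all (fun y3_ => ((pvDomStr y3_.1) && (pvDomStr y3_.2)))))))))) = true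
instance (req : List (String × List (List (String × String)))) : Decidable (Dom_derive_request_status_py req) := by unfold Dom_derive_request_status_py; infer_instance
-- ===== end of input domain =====

-- B replaces the decision-set plus precedence branch chain by a max-reduction over a
-- numeric severity lattice followed by a table lookup (alternative algorithm, same cost).

-- ===== PORT A =====
def derive_request_status_py (req : List (String × List (List (String × String)))) : String :=
  let approvals := (PySem.Dict.mk req).getD "approvals" []
  if approvals.isEmpty then "submitted"
  else
    let decisions : PySem.Set String :=
      PySem.Set.ofList (approvals.map (fun a => (PySem.Dict.mk a).getD "decision" ""))
    if PySem.Set.contains decisions "rejected" then "rejected"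
    else if decisions.all (fun dec => dec == "approved") then "approved"
    else if PySem.Set.contains decisions "deferred" then "deferred"
    else "pending_review"

-- ===== PORT B =====
-- _severity of Source B, an if-chain
def pvSeverity (decision : String) : Nat :=
  if decision == "rejected" then 3
  else if decision == "deferred" then 2
  else if decision == "approved" then 0
  else 1

def derive_request_status_py_alt (req : List (String × List (List (String × String)))) : String :=
  let approvals := (PySem.Dict.mk req).getD "approvals" []
  if approvals.isEmpty then "submitted"
  else
    -- Python's max over the nonempty generator; foldl Nat.max 0 is exact since severities are ≥ 0
    let worst := (approvals.map (fun a => pvSeverity ((PySem.Dict.mk a).getD "decision" ""))).foldl Nat.max 0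
    -- tuple index _STATUS_BY_SEVERITY[worst]; exact since worst ≤ 3 is always in range
    (["approved", "pending_review", "deferred", "rejected"]).getD worst ""

-- ===== PRECONDITION & SPEC =====
-- Pre_ excludes inputs where some approval dict lacks the "decision" key, on which Python A raises KeyError.
def Pre_derive_request_status_py (req : List (String × List (List (String × String)))) : Prop :=
  (((PySem.Dict.mk req).getD "approvals" []).all
    (fun a => (PySem.Dict.mk a).contains "decision")) = true
instance (req : List (String × List (List (String × String)))) : Decidable (Pre_derive_request_status_py req) := by unfold Pre_derive_request_status_py; infer_instance

def pvWitness_derive_request_status_py : (List (String × List (List (String × String)))) :=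
  [("approvals", [[("decision", "approved")], [("decision", "deferred")]])]

def Spec_derive_request_status_py (req : List (String × List (List (String × String)))) (out : String) : Prop := out = derive_request_status_py_alt req
instance (req : List (String × List (List (String × String)))) (out : String) : Decidable (Spec_derive_request_status_py req out) := by unfold Spec_derive_request_status_py; infer_instance

-- ===== CLAIM (what is proved, stated in full; the proofs are below) =====
def Claim_equal_derive_request_status_py : Prop := ∀ (req : List (String × List (List (String × String)))), Dom_derive_request_status_py req → Pre_derive_request_status_py req → Spec_derive_request_status_py req (derive_request_status_py req)

-- ===== LEMMAS AND PROOFS =====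

-- membership in the decision set equals an any-scan over the original list
theorem pvSet_contains_ofList (l : List String) (x : String) :
    PySem.Set.contains (PySem.Set.ofList l) x = l.any (fun d => d == x) := by
  simp only [PySem.Set.contains, List.contains_eq_mem, PySem.Set.mem_ofList]
  rw [Bool.eq_iff_iff]
  simp only [decide_eq_true_eq, List.any_eq_true, beq_iff_eq]
  exact ⟨fun h => ⟨x, h, rfl⟩, fun ⟨d, hd, he⟩ => he ▸ hd⟩

-- an all-scan over the deduplicated decision set equals the all-scan over the original list
theorem pvSet_all_ofList (l : List String) (p : String → Bool) :
    (PySem.Set.ofList l).all p = l.all p := by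
  rw [Bool.eq_iff_iff]
  simp only [List.all_eq_true]
  exact ⟨fun h d hd => h d ((PySem.Set.mem_ofList l d).2 hd),
         fun h d hd => h d ((PySem.Set.mem_ofList l d).1 hd)⟩

-- Nat.max is the lattice max (lets omega reason about it)
theorem pvNatMax (a b : Nat) : Nat.max a b = max a b := rfl

-- foldl Nat.max with an accumulator factors out
theorem pvFoldlMax_shift (l : List Nat) (acc : Nat) :
    l.foldl Nat.max acc = Nat.max acc (l.foldl Nat.max 0) := by
  induction l generalizing acc with
  | nil => simp
  | cons x xs ih => simp [List.foldl, ih (Nat.max acc x), ih x, Nat.max_assoc]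

-- every element is ≤ the fold
theorem pvMem_le_foldlMax (l : List Nat) (x : Nat) (hx : x ∈ l) :
    x ≤ l.foldl Nat.max 0 := by
  induction l with
  | nil => cases hx
  | cons y ys ih =>
    rw [List.foldl, pvFoldlMax_shift, pvNatMax, pvNatMax]
    rcases List.mem_cons.1 hx with h | h
    · subst h; omega
    · have := ih h; omega

-- the fold is 0 or attained by some element
theorem pvFoldlMax_attained (l : List Nat) :
    l.foldl Nat.max 0 = 0 ∨ ∃ x ∈ l, x = l.foldl Nat.max 0 := by
  induction l with
  | nil => exact Or.inl rfl
  | cons y ys ih =>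
    rw [List.foldl, pvFoldlMax_shift, pvNatMax, pvNatMax]
    rcases ih with h0 | ⟨x, hx, he⟩
    · exact Or.inr ⟨y, List.mem_cons_self, by omega⟩
    · by_cases h : y ≤ ys.foldl Nat.max 0
      · exact Or.inr ⟨x, List.mem_cons_of_mem _ hx, by omega⟩
      · exact Or.inr ⟨y, List.mem_cons_self, by omega⟩

-- severity is ≤ 3
theorem pvSeverity_le (d : String) : pvSeverity d ≤ 3 := by
  unfold pvSeverity; split_ifs <;> omega

theorem pvSeverity_eq_three (d : String) : pvSeverity d = 3 ↔ d = "rejected" := by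
  unfold pvSeverity; split_ifs with h1 h2 h3 <;> simp_all [beq_iff_eq]

theorem pvSeverity_eq_zero (d : String) : pvSeverity d = 0 ↔ d = "approved" := by
  unfold pvSeverity; split_ifs with h1 h2 h3 <;> simp_all [beq_iff_eq]

theorem pvSeverity_eq_two (d : String) : pvSeverity d = 2 ↔ d = "deferred" := by
  unfold pvSeverity; split_ifs with h1 h2 h3 <;> simp_all [beq_iff_eq]

-- ===== VERDICT (by name: the statement is the Claim_ definition above) =====
theorem derive_request_status_py_spec : Claim_equal_derive_request_status_py := by
  intro req _ _
  unfold Spec_derive_request_status_py derive_request_status_py derive_request_status_py_alt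
  by_cases hemp : ((PySem.Dict.mk req).getD "approvals" []).isEmpty
  · simp [hemp]
  · simp only [hemp, pvSet_contains_ofList, pvSet_all_ofList, List.any_map,
      List.all_map, Function.comp_def]
    set l := (PySem.Dict.mk req).getD "approvals" [] with hl
    set M := (l.map (fun a => pvSeverity ((PySem.Dict.mk a).getD "decision" ""))).foldl Nat.max 0 with hM
    have hmem_le : ∀ a ∈ l, pvSeverity ((PySem.Dict.mk a).getD "decision" "") ≤ M :=
      fun a ha => pvMem_le_foldlMax _ _ (List.mem_map_of_mem ha)
    have hatt : M = 0 ∨ ∃ a ∈ l, pvSeverity ((PySem.Dict.mk a).getD "decision" "") = M := by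
      rcases pvFoldlMax_attained (l.map (fun a => pvSeverity ((PySem.Dict.mk a).getD "decision" ""))) with h0 | ⟨x, hx, he⟩
      · exact Or.inl h0
      · rcases List.mem_map.1 hx with ⟨a, ha, rfl⟩
        exact Or.inr ⟨a, ha, he⟩
    by_cases hr : (l.any fun a => (PySem.Dict.mk a).getD "decision" "" == "rejected") = true
    · -- some rejected: A returns "rejected"; M = 3
      have h3 : M = 3 := by
        rcases List.any_eq_true.1 hr with ⟨a, ha, he⟩
        have := (pvSeverity_eq_three _).2 (beq_iff_eq.1 he)
        have hle := hmem_le a ha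
        rcases hatt with h0 | ⟨b, hb, hbe⟩
        · omega
        · have := pvSeverity_le ((PySem.Dict.mk b).getD "decision" ""); omega
      rw [if_pos hr, h3]; rfl
    · have hno3 : ∀ a ∈ l, pvSeverity ((PySem.Dict.mk a).getD "decision" "") ≤ 2 := by
        intro a ha
        have hne : (PySem.Dict.mk a).getD "decision" "" ≠ "rejected" := fun h =>
          hr (List.any_eq_true.2 ⟨a, ha, beq_iff_eq.2 h⟩)
        have := pvSeverity_le ((PySem.Dict.mk a).getD "decision" "")
        rcases Nat.lt_or_ge (pvSeverity ((PySem.Dict.mk a).getD "decision" "")) 3 with h | h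
        · omega
        · exact absurd ((pvSeverity_eq_three _).1 (by omega)) hne
      by_cases ha : (l.all fun a => (PySem.Dict.mk a).getD "decision" "" == "approved") = true
      · -- all approved: A returns "approved"; M = 0
        have h0 : M = 0 := by
          rcases hatt with h0 | ⟨a, hal, he⟩
          · exact h0
          · have := (pvSeverity_eq_zero ((PySem.Dict.mk a).getD "decision" "")).2
              (beq_iff_eq.1 (List.all_eq_true.1 ha a hal))
            omega
        rw [if_neg hr, if_pos ha, h0]; rfl
      · -- not all approved: M ≥ 1
        have hM1 : 1 ≤ M := by
          rcases List.all_eq_false.1 (Bool.of_not_eq_true ha) with ⟨a, hal, hne⟩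
          have h0 : pvSeverity ((PySem.Dict.mk a).getD "decision" "") ≠ 0 := by
            intro h
            have := (pvSeverity_eq_zero _).1 h
            simp [this] at hne
          have := hmem_le a hal
          omega
        by_cases hd : (l.any fun a => (PySem.Dict.mk a).getD "decision" "" == "deferred") = true
        · -- deferred present: A returns "deferred"; M = 2
          have h2 : M = 2 := by
            rcases List.any_eq_true.1 hd with ⟨a, hal, he⟩
            have : pvSeverity ((PySem.Dict.mk a).getD "decision" "") = 2 :=
              (pvSeverity_eq_two _).2 (beq_iff_eq.1 he)
            have := hmem_le a hal
            have hup : M ≤ 2 := by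
              rcases hatt with h0 | ⟨b, hbl, hbe⟩
              · omega
              · have := hno3 b hbl; omega
            omega
          rw [if_neg hr, if_neg ha, if_pos hd, h2]; rfl
        · -- else: A returns "pending_review"; M = 1
          have h1 : M = 1 := by
            have hup : M ≤ 1 := by
              rcases hatt with h0 | ⟨b, hbl, hbe⟩
              · omega
              · have hb2 := hno3 b hbl
                have hne : (PySem.Dict.mk b).getD "decision" "" ≠ "deferred" := fun h =>
                  hd (List.any_eq_true.2 ⟨b, hbl, beq_iff_eq.2 h⟩)
                rcases Nat.lt_or_ge (pvSeverity ((PySem.Dict.mk b).getD "decision" "")) 2 with h | h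
                · omega
                · exact absurd ((pvSeverity_eq_two _).1 (by omega)) hne
            omega
          rw [if_neg hr, if_neg ha, if_neg hd, h1]; rfl
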